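-- pv_equiv track=rewrite | github.com/parkerahall/dailycodingchallenge | 4-12-19.py | palindromable_brute
-- ===== SOURCE A (Python) =====
-- def palindromable_brute(string, k, j=0):
--     if type(string) == str:
--         string = list(string)
--
--     if string == string[::-1]:
--         return True
--     elif k == 0:
--         return False
--
--     good = False
--     for i in range(j, len(string)):
--         new_string = string[:i] + string[i + 1:]
--         good = good or palindromable_brute(new_string, k - 1, i)
--     return good
-- ===== SOURCE B (Python) =====
-- def palindromable_brute(string, k, j=0):
--     frontier = {(tuple(string), j)}
--     while frontier:
--         if any(t == t[::-1] for (t, _) in frontier):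
--             return True
--         if k == 0:
--             return False
--         k -= 1
--         frontier = {(t[:i] + t[i + 1:], i)
--                     for (t, jj) in frontier
--                     for i in range(jj, len(t))}
--     return False
-- ===== Notes on version B (the rewrite author's own statement) =====
-- stated objective: alternative
-- what changed: A's depth-first recursion over all deletion sequences is replaced by an iterative breadth-first search whose per-level frontier is a set of (string, start-index) states, so duplicate intermediate strings are merged instead of re-explored.
-- outside the precondition, e.g. on palindromable_brute('ab', 1, -1): A returns True, B returns True
import Mathlib
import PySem

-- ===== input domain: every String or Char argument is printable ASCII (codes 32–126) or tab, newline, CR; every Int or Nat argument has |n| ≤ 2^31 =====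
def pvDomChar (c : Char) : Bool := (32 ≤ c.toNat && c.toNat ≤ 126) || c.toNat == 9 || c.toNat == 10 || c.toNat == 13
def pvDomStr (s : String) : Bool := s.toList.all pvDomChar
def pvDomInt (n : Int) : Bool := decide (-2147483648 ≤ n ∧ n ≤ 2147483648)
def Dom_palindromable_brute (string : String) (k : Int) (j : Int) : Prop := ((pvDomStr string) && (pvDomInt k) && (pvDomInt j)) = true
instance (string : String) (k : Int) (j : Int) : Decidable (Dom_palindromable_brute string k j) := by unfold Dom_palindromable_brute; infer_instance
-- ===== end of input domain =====

-- B replaces A's depth-first recursion over all deletion sequences by a breadth-first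
-- level-by-level search whose frontier is a SET of states, so duplicate intermediate
-- strings are merged instead of re-explored (objective: alternative).

-- ===== PORT A =====
-- string[:i] + string[i+1:]  (shared by both ports: the identical slicing expression occurs in both Pythons)
def pvDelete (s : List Char) (i : Int) : List Char :=
  PySem.List.slice s none (some i) ++ PySem.List.slice s (some (i + 1)) none

-- literal port of A's recursion; the Nat fuel only makes the recursion structural
-- (under Pre_, 0 ≤ j, every recursive call strictly shortens the string, so
-- string.length + 1 fuel is never exhausted).
def palA : Nat → List Char → Int → Int → Bool
  | 0, _, _, _ => false   -- fuel guard, unreachable under Pre_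
  | fuel + 1, s, k, j =>
    -- string == string[::-1]  (s[::-1] is reverse: PySem.List.slice?_none_none_neg_one)
    if s = s.reverse then true
    else if k = 0 then false
    else
      -- good = False; for i in range(j, len(string)): good = good or rec(...)
      (PySem.List.pyRange j (s.length : Int) 1).foldl
        (fun good i => good || palA fuel (pvDelete s i) (k - 1) i) false

def palindromable_brute (string : String) (k : Int) (j : Int) : Bool :=
  palA (string.toList.length + 1) string.toList k j

-- ===== PORT B =====
-- {(t[:i] + t[i+1:], i) for i in range(jj, len(t))} contributed by one frontier state
def pvExpand (st : List Char × Int) : List (List Char × Int) :=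
  (PySem.List.pyRange st.2 (st.1.length : Int) 1).map (fun i => (pvDelete st.1 i, i))

-- literal port of B's while-loop over the frontier set; fuel length + 2 covers every
-- iteration (frontier strings shrink by one character per level under Pre_).
def pvBfs : Nat → PySem.Set (List Char × Int) → Int → Bool
  | 0, _, _ => false   -- fuel guard, unreachable under Pre_
  | fuel + 1, frontier, k =>
    if frontier.isEmpty then false           -- while frontier:
    else if frontier.any (fun st => decide (st.1 = st.1.reverse)) then true
    else if k = 0 then false
    else pvBfs fuel (PySem.Set.ofList (frontier.flatMap pvExpand)) (k - 1)

def palindromable_brute_alt (string : String) (k : Int) (j : Int) : Bool :=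
  pvBfs (string.toList.length + 2) [(string.toList, j)] k

-- ===== PRECONDITION & SPEC =====
-- Pre_ excludes negative j (j is A's internal recursion parameter, always called with i ≥ 0):
-- there Python's negative-index slicing makes string[:i] + string[i+1:] a wraparound
-- non-deletion that can grow the string, so A raises RecursionError for every k < 0, and
-- where A does return the value is an accident of that wraparound.
def Pre_palindromable_brute (string : String) (k : Int) (j : Int) : Prop := 0 ≤ j
instance (string : String) (k : Int) (j : Int) : Decidable (Pre_palindromable_brute string k j) := by unfold Pre_palindromable_brute; infer_instance

def pvWitness_palindromable_brute : String × Int × Int := ("abca", 1, 0)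

def Spec_palindromable_brute (string : String) (k : Int) (j : Int) (out : Bool) : Prop := out = palindromable_brute_alt string k j
instance (string : String) (k : Int) (j : Int) (out : Bool) : Decidable (Spec_palindromable_brute string k j out) := by unfold Spec_palindromable_brute; infer_instance

-- ===== CLAIM (what is proved, stated in full; the proofs are below) =====
def Claim_equal_palindromable_brute : Prop := ∀ (string : String) (k : Int) (j : Int), Dom_palindromable_brute string k j → Pre_palindromable_brute string k j → Spec_palindromable_brute string k j (palindromable_brute string k j)

-- ===== LEMMAS AND PROOFS =====

-- for i in range(j, len s) with 0 ≤ j: deleting index i shortens s by exactly one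
lemma pvDelete_length (s : List Char) (i : Int) (h0 : 0 ≤ i) (h1 : i < (s.length : Int)) :
    (pvDelete s i).length = s.length - 1 := by
  unfold pvDelete
  rw [PySem.List.slice_to s h0, PySem.List.slice_from s (show (0:Int) ≤ i + 1 by omega)]
  simp only [List.length_append, List.length_take, List.length_drop]
  omega

lemma pvExpand_mem (st : List Char × Int) (st' : List Char × Int)
    (hj : 0 ≤ st.2) (hmem : st' ∈ pvExpand st) :
    st'.1.length = st.1.length - 1 ∧ 0 ≤ st'.2 := by
  unfold pvExpand at hmem
  rcases List.mem_map.mp hmem with ⟨i, hi, rfl⟩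
  rcases (PySem.List.mem_pyRange_one).mp hi with ⟨hle, hlt⟩
  exact ⟨pvDelete_length st.1 i (by omega) hlt, by simpa using le_trans hj hle⟩

-- foldl of boolean-or is any
lemma foldl_or_any (l : List Int) (h : Int → Bool) (b : Bool) :
    l.foldl (fun g i => g || h i) b = (b || l.any h) := by
  induction l generalizing b with
  | nil => simp
  | cons x xs ih => rw [List.foldl_cons, ih, List.any_cons, Bool.or_assoc]

-- any over the dedup PySem.Set.ofList equals any over the underlying list
lemma any_ofList {α : Type} [BEq α] [LawfulBEq α] (l : List α) (p : α → Bool) :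
    (PySem.Set.ofList l).any p = l.any p := by
  rcases hb : l.any p with _ | _
  · rcases ha : (PySem.Set.ofList l).any p with _ | _
    · rfl
    · rcases List.any_eq_true.mp ha with ⟨x, hx, hpx⟩
      have : x ∈ l := (PySem.Set.mem_ofList l x).mp hx
      exact absurd (List.any_eq_true.mpr ⟨x, this, hpx⟩) (by simp [hb])
  · rcases List.any_eq_true.mp hb with ⟨x, hx, hpx⟩
    exact List.any_eq_true.mpr ⟨x, (PySem.Set.mem_ofList l x).mpr hx, hpx⟩

-- one unfolding of A's recursion at a non-palindromic string with k ≠ 0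
lemma palA_step (m : Nat) (s : List Char) (k j : Int)
    (hnp : ¬ s = s.reverse) (hk : ¬ k = 0) :
    palA (m + 1) s k j
      = (PySem.List.pyRange j (s.length : Int) 1).foldl
          (fun good i => good || palA m (pvDelete s i) (k - 1) i) false := by
  rw [palA]
  simp [hnp, hk]

-- main invariant: on a frontier of equal-length states with nonnegative j's,
-- the BFS equals the disjunction of A's recursion over the frontier
lemma pvBfs_eq_any (n : Nat) : ∀ (fB : Nat) (F : List (List Char × Int)) (k : Int),
    (∀ st ∈ F, st.1.length = n ∧ 0 ≤ st.2) → n + 2 ≤ fB →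
    pvBfs fB F k = F.any (fun st => palA (n + 1) st.1 k st.2) := by
  induction n with
  | zero =>
    intro fB F k hF hfB
    match fB, hfB with
    | fB' + 1, _ =>
      rw [pvBfs]
      cases F with
      | nil => simp
      | cons st F' =>
        have h0 : st.1 = [] := List.length_eq_zero_iff.mp (hF st (by simp)).1
        have hpal : (st :: F').any (fun st => decide (st.1 = st.1.reverse)) = true :=
          List.any_eq_true.mpr ⟨st, by simp, by simp [h0]⟩
        have hpal' : (st :: F').any (fun st => palA 1 st.1 k st.2) = true :=
          List.any_eq_true.mpr ⟨st, by simp, by rw [palA]; simp [h0]⟩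
        rw [hpal', hpal]
        simp
  | succ m ih =>
    intro fB F k hF hfB
    match fB, hfB with
    | fB' + 1, _ =>
      rw [pvBfs]
      cases hFe : F.isEmpty with
      | true =>
        rw [List.isEmpty_iff.mp hFe]
        simp
      | false =>
        rw [if_neg (by simp)]
        rcases hP : F.any (fun st => decide (st.1 = st.1.reverse)) with _ | _
        · -- no palindrome in the frontier
          rw [if_neg (by simp)]
          have hnp : ∀ st ∈ F, ¬ st.1 = st.1.reverse := by
            intro st hst
            simpa using List.any_eq_false.mp hP st hst
          by_cases hk : k = 0
          · -- budget exhausted: both sides are false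
            subst hk
            rw [if_pos rfl]
            symm
            apply List.any_eq_false.mpr
            intro st hst
            rw [palA]
            simp [hnp st hst]
          · -- expand one level and use the induction hypothesis
            rw [if_neg hk]
            have hL : ∀ st' ∈ PySem.Set.ofList (F.flatMap pvExpand),
                st'.1.length = m ∧ 0 ≤ st'.2 := by
              intro st' hst'
              rcases List.mem_flatMap.mp
                  ((PySem.Set.mem_ofList (F.flatMap pvExpand) st').mp hst') with ⟨st, hst, hmem⟩
              have h := pvExpand_mem st st' (hF st hst).2 hmem
              have := (hF st hst).1
              exact ⟨by omega, h.2⟩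
            rw [ih fB' _ (k - 1) hL (by omega), any_ofList, List.any_flatMap]
            apply PySem.List.any_congr_mem
            intro st hst
            rw [palA_step (m + 1) st.1 k st.2 (hnp st hst) hk, foldl_or_any]
            unfold pvExpand
            rw [List.any_map]
            rfl
        · -- a palindrome is in the frontier: both sides are true
          rw [if_pos rfl]
          rcases List.any_eq_true.mp hP with ⟨st, hst, hpal⟩
          symm
          exact List.any_eq_true.mpr ⟨st, hst, by rw [palA]; rw [if_pos (of_decide_eq_true hpal)]⟩

-- ===== VERDICT (by name: the statement is the Claim_ definition above) =====
theorem palindromable_brute_spec : Claim_equal_palindromable_brute := by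
  intro s k j _ hj
  show palindromable_brute s k j = palindromable_brute_alt s k j
  unfold palindromable_brute palindromable_brute_alt
  rw [pvBfs_eq_any (s.toList.length) (s.toList.length + 2) [(s.toList, j)] k
      (by intro st hst; simp at hst; subst hst; exact ⟨rfl, hj⟩) (by omega)]
  simp
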